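-- pv_equiv track=rewrite | github.com/allanlzee/ICS-Culminating | 2048.py | tile_shift
-- ===== SOURCE A (Python) =====
-- BOARD_SIDE_LENGTH = 4
--
-- def generate_empty_board(game_tiles: list) -> list:
--     """Generates a empty game board, which is a 4 by 4 two dimensional list
--     with only 0s.
--
--     >>> generate_empty_board([])
--     [[0, 0, 0, 0],
--      [0, 0, 0, 0],
--      [0, 0, 0, 0],
--      [0, 0, 0, 0]]
--     """
--
--     for i in range(BOARD_SIDE_LENGTH):
--         game_tiles.append([0] * BOARD_SIDE_LENGTH)
--
--     return game_tiles
--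
-- def tile_shift(game_tiles: list, upwards: bool) -> list:
--     """Shift the tiles in the grid game_tiles in the upwards or leftwards
--     direction. Return the new game tiles as a two dimensional list.
--
--     >>> tile_shift([[0, 0, 0, 0],
--                     [0, 0, 0, 0],
--                     [0, 0, 0, 0],
--                     [0, 0, 0, 2]],
--                     "up")
--     [[0, 0, 0, 2],
--      [0, 0, 0, 0],
--      [0, 0, 0, 0],
--      [0, 0, 0, 0]]
--
--     >>> tile_shift([[0, 0, 0, 0],
--                     [0, 0, 0, 0],
--                     [0, 0, 0, 0],
--                     [0, 0, 0, 2]], "left")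
--     [[0, 0, 0, 0],
--      [0, 0, 0, 0],
--      [0, 0, 0, 0],
--      [2, 0, 0, 0]]
--     """
--
--     shifted_tiles = generate_empty_board([])
--
--     # Tile shift upwards.
--     if upwards:
--         for col in range(BOARD_SIDE_LENGTH):
--             empty_position = 0
--
--             for row in range(BOARD_SIDE_LENGTH):
--                 # Shift non-zero tiles as far up as possible (no merge).
--                 if game_tiles[row][col] != 0:
--                     shifted_tiles[empty_position][col] = game_tiles[row][col]
--                     empty_position += 1
--
--     # Tile shift leftwards.
--     else:
--         for row in range(BOARD_SIDE_LENGTH):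
--             empty_position = 0
--
--             for col in range(BOARD_SIDE_LENGTH):
--                 # Shift non-zero tiles as far left as possible (no merge).
--                 if game_tiles[row][col] != 0:
--                     shifted_tiles[row][empty_position] = game_tiles[row][col]
--                     empty_position += 1
--
--     return shifted_tiles
-- ===== SOURCE B (Python) =====
-- def tile_shift(game_tiles: list, upwards: bool) -> list:
--     """Shift tiles up or left (no merge) via a stable sort: sorting each line
--     with key (x == 0) moves zeros to the end while stability keeps the
--     non-zero tiles in their original order."""
--
--     def shift(line):
--         return sorted(line, key=lambda x: x == 0)
--
--     if upwards:
--         cols = [shift([game_tiles[r][c] for r in range(4)]) for c in range(4)]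
--         return [[cols[c][r] for c in range(4)] for r in range(4)]
--     else:
--         return [shift([game_tiles[r][c] for c in range(4)]) for r in range(4)]
-- ===== Notes on version B (the rewrite author's own statement) =====
-- stated objective: alternative
-- what changed: Replaces A's cursor-driven in-place writes into a preallocated empty board with a stable sort of each row/column keyed by (x == 0): zeros sort to the end while stability preserves the non-zero order; left uses per-row slices, up sorts each column and transposes back with zip.
import Mathlib
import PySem

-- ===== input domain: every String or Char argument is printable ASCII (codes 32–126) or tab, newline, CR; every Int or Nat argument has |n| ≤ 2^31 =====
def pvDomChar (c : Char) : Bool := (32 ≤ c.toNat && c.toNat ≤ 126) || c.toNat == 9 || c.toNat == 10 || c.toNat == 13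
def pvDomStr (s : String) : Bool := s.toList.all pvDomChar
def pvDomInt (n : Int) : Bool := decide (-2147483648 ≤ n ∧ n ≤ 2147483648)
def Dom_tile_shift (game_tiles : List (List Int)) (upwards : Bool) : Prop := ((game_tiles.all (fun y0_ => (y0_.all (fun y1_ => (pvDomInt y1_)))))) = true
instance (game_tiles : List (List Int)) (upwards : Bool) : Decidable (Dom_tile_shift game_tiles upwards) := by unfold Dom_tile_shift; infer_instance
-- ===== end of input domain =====

-- B replaces A's cursor-driven writes into a preallocated board by a stable sort
-- of each line keyed by (x == 0) (zeros move to the end, stability keeps the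
-- non-zero order), per row for left and per column + transpose for up; same
-- value, not claimed faster.

-- ===== PORT A =====
-- game_tiles[row][col]: indices here are always 0..3 and in range under
-- Pre_tile_shift, so the getD default 0 is never used inside Pre_.
def gv (g : List (List Int)) (r c : Nat) : Int := (g.getD r []).getD c 0

-- shifted[r][c] = v for in-range r, c (always in range on the 4×4 board A builds)
def set2 (b : List (List Int)) (r c : Nat) (v : Int) : List (List Int) :=
  b.set r ((b.getD r []).set c v)

-- generate_empty_board: appends [0]*4 four times
def generate_empty_board (game_tiles : List (List Int)) : List (List Int) :=
  (List.range 4).foldl (fun acc _ => acc ++ [List.replicate 4 (0 : Int)]) game_tiles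

-- inner loop of the up branch for one column (empty_position is the Nat counter)
def shiftColUp (g : List (List Int)) (col : Nat) (s : List (List Int)) : List (List Int) :=
  ((List.range 4).foldl
    (fun (p : List (List Int) × Nat) row =>
      if gv g row col ≠ 0 then (set2 p.1 p.2 col (gv g row col), p.2 + 1) else p)
    (s, 0)).1

-- inner loop of the left branch for one row
def shiftRowLeft (g : List (List Int)) (row : Nat) (s : List (List Int)) : List (List Int) :=
  ((List.range 4).foldl
    (fun (p : List (List Int) × Nat) col =>
      if gv g row col ≠ 0 then (set2 p.1 row p.2 (gv g row col), p.2 + 1) else p)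
    (s, 0)).1

def tile_shift (game_tiles : List (List Int)) (upwards : Bool) : List (List Int) :=
  let shifted := generate_empty_board []
  if upwards then
    (List.range 4).foldl (fun s col => shiftColUp game_tiles col s) shifted
  else
    (List.range 4).foldl (fun s row => shiftRowLeft game_tiles row s) shifted

-- ===== PORT B =====
-- sorted(line, key=lambda x: x == 0): stable sort, zeros (key True) to the end
def shiftLine (line : List Int) : List Int :=
  PySem.List.sorted line (fun x => x == 0) false

-- game_tiles[r][c]: always in range under Pre_tile_shift, so the getD default is unused there
def bget (g : List (List Int)) (r c : Nat) : Int :=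
  PySem.List.pyGetD (PySem.List.pyGetD g (r : Int) []) (c : Int) 0

def tile_shift_alt (game_tiles : List (List Int)) (upwards : Bool) : List (List Int) :=
  if upwards then
    let cols := (List.range 4).map
      (fun c => shiftLine ((List.range 4).map (fun r => bget game_tiles r c)))
    (List.range 4).map (fun r => (List.range 4).map
      (fun c => PySem.List.pyGetD (PySem.List.pyGetD cols (c : Int) []) (r : Int) 0))
  else
    (List.range 4).map
      (fun r => shiftLine ((List.range 4).map (fun c => bget game_tiles r c)))

-- ===== PRECONDITION & SPEC =====
-- Pre_ excludes exactly the inputs where Python A raises IndexError: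
-- boards with fewer than 4 rows, or whose first 4 rows have fewer than 4 entries
-- (both branches read game_tiles[row][col] for all row, col in 0..3).
def Pre_tile_shift (game_tiles : List (List Int)) (upwards : Bool) : Prop :=
  4 ≤ game_tiles.length ∧ ∀ r ∈ List.range 4, 4 ≤ (game_tiles.getD r []).length
instance (game_tiles : List (List Int)) (upwards : Bool) : Decidable (Pre_tile_shift game_tiles upwards) := by unfold Pre_tile_shift; infer_instance

def pvWitness_tile_shift : List (List Int) × Bool :=
  ([[0, 0, 0, 0], [0, 0, 0, 0], [0, 0, 0, 0], [0, 0, 0, 2]], true)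

def Spec_tile_shift (game_tiles : List (List Int)) (upwards : Bool) (out : List (List Int)) : Prop := out = tile_shift_alt game_tiles upwards
instance (game_tiles : List (List Int)) (upwards : Bool) (out : List (List Int)) : Decidable (Spec_tile_shift game_tiles upwards out) := by unfold Spec_tile_shift; infer_instance

-- ===== CLAIM (what is proved, stated in full; the proofs are below) =====
def Claim_equal_tile_shift : Prop := ∀ (game_tiles : List (List Int)) (upwards : Bool), Dom_tile_shift game_tiles upwards → Pre_tile_shift game_tiles upwards → Spec_tile_shift game_tiles upwards (tile_shift game_tiles upwards)

-- ===== LEMMAS AND PROOFS =====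

-- proof-side normal form of one shifted line: non-zeros in order, zero-padded
def compactB (line : List Int) : List Int :=
  let nonzero := line.filter (fun x => x ≠ 0)
  nonzero ++ List.replicate (4 - nonzero.length) 0

theorem shiftLine_eq (a b c d : Int) :
    shiftLine [a, b, c, d] = compactB [a, b, c, d] := by
  rcases eq_or_ne a 0 with h0 | h0 <;>
  rcases eq_or_ne b 0 with h1 | h1 <;>
  rcases eq_or_ne c 0 with h2 | h2 <;>
  rcases eq_or_ne d 0 with h3 | h3 <;>
    simp [shiftLine, PySem.List.sorted_eq_foldl_insertBy, PySem.List.insertBy,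
      compactB, h0, h1, h2, h3, Bool.lt_iff, beq_iff_eq]

theorem upcol0 (g : List (List Int)) :
    shiftColUp g 0 [[0, 0, 0, 0], [0, 0, 0, 0], [0, 0, 0, 0], [0, 0, 0, 0]]
      = [[(compactB [gv g 0 0, gv g 1 0, gv g 2 0, gv g 3 0]).getD 0 0, 0, 0, 0], [(compactB [gv g 0 0, gv g 1 0, gv g 2 0, gv g 3 0]).getD 1 0, 0, 0, 0], [(compactB [gv g 0 0, gv g 1 0, gv g 2 0, gv g 3 0]).getD 2 0, 0, 0, 0], [(compactB [gv g 0 0, gv g 1 0, gv g 2 0, gv g 3 0]).getD 3 0, 0, 0, 0]] := by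
  unfold shiftColUp
  rcases eq_or_ne (gv g 0 0) 0 with h0 | h0 <;>
  rcases eq_or_ne (gv g 1 0) 0 with h1 | h1 <;>
  rcases eq_or_ne (gv g 2 0) 0 with h2 | h2 <;>
  rcases eq_or_ne (gv g 3 0) 0 with h3 | h3 <;>
    simp [show (List.range 4) = [0,1,2,3] from rfl, List.foldl_cons, List.foldl_nil,
      h0, h1, h2, h3, set2, compactB, List.getD]

theorem upcol1 (g : List (List Int)) (x00 x10 x20 x30 : Int) :
    shiftColUp g 1 [[x00, 0, 0, 0], [x10, 0, 0, 0], [x20, 0, 0, 0], [x30, 0, 0, 0]]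
      = [[x00, (compactB [gv g 0 1, gv g 1 1, gv g 2 1, gv g 3 1]).getD 0 0, 0, 0], [x10, (compactB [gv g 0 1, gv g 1 1, gv g 2 1, gv g 3 1]).getD 1 0, 0, 0], [x20, (compactB [gv g 0 1, gv g 1 1, gv g 2 1, gv g 3 1]).getD 2 0, 0, 0], [x30, (compactB [gv g 0 1, gv g 1 1, gv g 2 1, gv g 3 1]).getD 3 0, 0, 0]] := by
  unfold shiftColUp
  rcases eq_or_ne (gv g 0 1) 0 with h0 | h0 <;>
  rcases eq_or_ne (gv g 1 1) 0 with h1 | h1 <;>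
  rcases eq_or_ne (gv g 2 1) 0 with h2 | h2 <;>
  rcases eq_or_ne (gv g 3 1) 0 with h3 | h3 <;>
    simp [show (List.range 4) = [0,1,2,3] from rfl, List.foldl_cons, List.foldl_nil,
      h0, h1, h2, h3, set2, compactB, List.getD]

theorem upcol2 (g : List (List Int)) (x00 x01 x10 x11 x20 x21 x30 x31 : Int) :
    shiftColUp g 2 [[x00, x01, 0, 0], [x10, x11, 0, 0], [x20, x21, 0, 0], [x30, x31, 0, 0]]
      = [[x00, x01, (compactB [gv g 0 2, gv g 1 2, gv g 2 2, gv g 3 2]).getD 0 0, 0], [x10, x11, (compactB [gv g 0 2, gv g 1 2, gv g 2 2, gv g 3 2]).getD 1 0, 0], [x20, x21, (compactB [gv g 0 2, gv g 1 2, gv g 2 2, gv g 3 2]).getD 2 0, 0], [x30, x31, (compactB [gv g 0 2, gv g 1 2, gv g 2 2, gv g 3 2]).getD 3 0, 0]] := by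
  unfold shiftColUp
  rcases eq_or_ne (gv g 0 2) 0 with h0 | h0 <;>
  rcases eq_or_ne (gv g 1 2) 0 with h1 | h1 <;>
  rcases eq_or_ne (gv g 2 2) 0 with h2 | h2 <;>
  rcases eq_or_ne (gv g 3 2) 0 with h3 | h3 <;>
    simp [show (List.range 4) = [0,1,2,3] from rfl, List.foldl_cons, List.foldl_nil,
      h0, h1, h2, h3, set2, compactB, List.getD]

theorem upcol3 (g : List (List Int)) (x00 x01 x02 x10 x11 x12 x20 x21 x22 x30 x31 x32 : Int) :
    shiftColUp g 3 [[x00, x01, x02, 0], [x10, x11, x12, 0], [x20, x21, x22, 0], [x30, x31, x32, 0]]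
      = [[x00, x01, x02, (compactB [gv g 0 3, gv g 1 3, gv g 2 3, gv g 3 3]).getD 0 0], [x10, x11, x12, (compactB [gv g 0 3, gv g 1 3, gv g 2 3, gv g 3 3]).getD 1 0], [x20, x21, x22, (compactB [gv g 0 3, gv g 1 3, gv g 2 3, gv g 3 3]).getD 2 0], [x30, x31, x32, (compactB [gv g 0 3, gv g 1 3, gv g 2 3, gv g 3 3]).getD 3 0]] := by
  unfold shiftColUp
  rcases eq_or_ne (gv g 0 3) 0 with h0 | h0 <;>
  rcases eq_or_ne (gv g 1 3) 0 with h1 | h1 <;>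
  rcases eq_or_ne (gv g 2 3) 0 with h2 | h2 <;>
  rcases eq_or_ne (gv g 3 3) 0 with h3 | h3 <;>
    simp [show (List.range 4) = [0,1,2,3] from rfl, List.foldl_cons, List.foldl_nil,
      h0, h1, h2, h3, set2, compactB, List.getD]

theorem rowLeft0 (g : List (List Int)) :
    shiftRowLeft g 0 [[0, 0, 0, 0], [0, 0, 0, 0], [0, 0, 0, 0], [0, 0, 0, 0]]
      = [compactB [gv g 0 0, gv g 0 1, gv g 0 2, gv g 0 3], [0, 0, 0, 0], [0, 0, 0, 0], [0, 0, 0, 0]] := by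
  unfold shiftRowLeft
  rcases eq_or_ne (gv g 0 0) 0 with h0 | h0 <;>
  rcases eq_or_ne (gv g 0 1) 0 with h1 | h1 <;>
  rcases eq_or_ne (gv g 0 2) 0 with h2 | h2 <;>
  rcases eq_or_ne (gv g 0 3) 0 with h3 | h3 <;>
    simp [show (List.range 4) = [0,1,2,3] from rfl, List.foldl_cons, List.foldl_nil,
      h0, h1, h2, h3, set2, compactB, List.getD]

theorem rowLeft1 (g : List (List Int)) (R0 : List Int) :
    shiftRowLeft g 1 [R0, [0, 0, 0, 0], [0, 0, 0, 0], [0, 0, 0, 0]]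
      = [R0, compactB [gv g 1 0, gv g 1 1, gv g 1 2, gv g 1 3], [0, 0, 0, 0], [0, 0, 0, 0]] := by
  unfold shiftRowLeft
  rcases eq_or_ne (gv g 1 0) 0 with h0 | h0 <;>
  rcases eq_or_ne (gv g 1 1) 0 with h1 | h1 <;>
  rcases eq_or_ne (gv g 1 2) 0 with h2 | h2 <;>
  rcases eq_or_ne (gv g 1 3) 0 with h3 | h3 <;>
    simp [show (List.range 4) = [0,1,2,3] from rfl, List.foldl_cons, List.foldl_nil,
      h0, h1, h2, h3, set2, compactB, List.getD]

theorem rowLeft2 (g : List (List Int)) (R0 R1 : List Int) :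
    shiftRowLeft g 2 [R0, R1, [0, 0, 0, 0], [0, 0, 0, 0]]
      = [R0, R1, compactB [gv g 2 0, gv g 2 1, gv g 2 2, gv g 2 3], [0, 0, 0, 0]] := by
  unfold shiftRowLeft
  rcases eq_or_ne (gv g 2 0) 0 with h0 | h0 <;>
  rcases eq_or_ne (gv g 2 1) 0 with h1 | h1 <;>
  rcases eq_or_ne (gv g 2 2) 0 with h2 | h2 <;>
  rcases eq_or_ne (gv g 2 3) 0 with h3 | h3 <;>
    simp [show (List.range 4) = [0,1,2,3] from rfl, List.foldl_cons, List.foldl_nil,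
      h0, h1, h2, h3, set2, compactB, List.getD]

theorem rowLeft3 (g : List (List Int)) (R0 R1 R2 : List Int) :
    shiftRowLeft g 3 [R0, R1, R2, [0, 0, 0, 0]]
      = [R0, R1, R2, compactB [gv g 3 0, gv g 3 1, gv g 3 2, gv g 3 3]] := by
  unfold shiftRowLeft
  rcases eq_or_ne (gv g 3 0) 0 with h0 | h0 <;>
  rcases eq_or_ne (gv g 3 1) 0 with h1 | h1 <;>
  rcases eq_or_ne (gv g 3 2) 0 with h2 | h2 <;>
  rcases eq_or_ne (gv g 3 3) 0 with h3 | h3 <;>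
    simp [show (List.range 4) = [0,1,2,3] from rfl, List.foldl_cons, List.foldl_nil,
      h0, h1, h2, h3, set2, compactB, List.getD]

theorem tile_shift_up (g : List (List Int)) :
    tile_shift g true = tile_shift_alt g true := by
  show (List.range 4).foldl (fun s col => shiftColUp g col s) (generate_empty_board []) = _
  rw [show generate_empty_board [] = [[0,0,0,0],[0,0,0,0],[0,0,0,0],[0,0,0,0]] from rfl,
      show (List.range 4) = [0,1,2,3] from rfl]
  simp only [List.foldl_cons, List.foldl_nil]
  rw [upcol0 g, upcol1 g, upcol2 g, upcol3 g]
  simp [tile_shift_alt, bget, gv, show (List.range 4) = [0,1,2,3] from rfl,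
    shiftLine_eq, List.getD, PySem.List.pyGetD_ofNat', PySem.List.pyGetD_zero]

theorem tile_shift_left (g : List (List Int)) :
    tile_shift g false = tile_shift_alt g false := by
  show (List.range 4).foldl (fun s row => shiftRowLeft g row s) (generate_empty_board []) = _
  rw [show generate_empty_board [] = [[0,0,0,0],[0,0,0,0],[0,0,0,0],[0,0,0,0]] from rfl,
      show (List.range 4) = [0,1,2,3] from rfl]
  simp only [List.foldl_cons, List.foldl_nil]
  rw [rowLeft0 g, rowLeft1 g, rowLeft2 g, rowLeft3 g]
  simp [tile_shift_alt, bget, gv, show (List.range 4) = [0,1,2,3] from rfl,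
    shiftLine_eq, List.getD, PySem.List.pyGetD_ofNat', PySem.List.pyGetD_zero]

-- ===== VERDICT (by name: the statement is the Claim_ definition above) =====
theorem tile_shift_spec : Claim_equal_tile_shift := by
  intro g up _ hp
  unfold Spec_tile_shift
  cases up
  · exact tile_shift_left g
  · exact tile_shift_up g
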